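-- pv_equiv track=rewrite | github.com/Ask-Akhi/cric-insights-ai | backend/src/services/llm_client.py | _is_truncated_table
-- ===== SOURCE A (Python) =====
-- def _is_truncated_table(text: str) -> bool:
--     """Return True if the response ends with a table header row but no data rows."""
--     if not text:
--         return False
--     lines = [l for l in text.splitlines() if l.strip()]
--     if len(lines) < 2:
--         return False
--     last = lines[-1].strip()
--     # Last line is a pipe-delimited row (header or separator)
--     if not (last.startswith("|") and last.endswith("|")):
--         return False
--     # Check if it's ONLY a header (no separator line followed by data)
--     # Find the last table block
--     table_lines = []
--     for line in reversed(lines):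
--         stripped = line.strip()
--         if stripped.startswith("|") and stripped.endswith("|"):
--             table_lines.insert(0, stripped)
--         else:
--             break
--     # A complete table needs: header + separator + at least 1 data row = 3+ lines
--     has_separator = any(set(l.replace("|", "").replace("-", "").replace(":", "").replace(" ", "")) == set() for l in table_lines)
--     return len(table_lines) < 3 or not has_separator
-- ===== SOURCE B (Python) =====
-- def _is_row(s):
--     return s.startswith("|") and s.endswith("|")
--
--
-- def _is_sep(s):
--     return all(c in "|-: " for c in s)
--
--
-- def _is_truncated_table(text: str) -> bool:
--     """Single forward pass: keep a running count of the current contiguous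
--     pipe-row block (reset on any other non-blank line), folding the
--     separator detection into the same pass."""
--     if not text:
--         return False
--     block_len = 0
--     has_sep = False
--     n = 0
--     last_is_row = False
--     for raw in text.splitlines():
--         s = raw.strip()
--         if not s:
--             continue
--         if _is_row(s):
--             block_len += 1
--             has_sep = has_sep or _is_sep(s)
--             n += 1
--             last_is_row = True
--         else:
--             block_len = 0
--             has_sep = False
--             n += 1
--             last_is_row = False
--     if n < 2 or not last_is_row:
--         return False
--     return block_len < 3 or not has_sep
-- ===== Notes on version B (the rewrite author's own statement) =====
-- stated objective: simpler
-- what changed: Replaces A's reversed scan-with-break that rebuilds the trailing table block as a list plus a second any()-pass with set() emptiness tests by one forward pass over the lines keeping a running block counter, a separator flag (all chars in "|-: "), a line count and a last-line-is-row flag.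
import Mathlib
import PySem

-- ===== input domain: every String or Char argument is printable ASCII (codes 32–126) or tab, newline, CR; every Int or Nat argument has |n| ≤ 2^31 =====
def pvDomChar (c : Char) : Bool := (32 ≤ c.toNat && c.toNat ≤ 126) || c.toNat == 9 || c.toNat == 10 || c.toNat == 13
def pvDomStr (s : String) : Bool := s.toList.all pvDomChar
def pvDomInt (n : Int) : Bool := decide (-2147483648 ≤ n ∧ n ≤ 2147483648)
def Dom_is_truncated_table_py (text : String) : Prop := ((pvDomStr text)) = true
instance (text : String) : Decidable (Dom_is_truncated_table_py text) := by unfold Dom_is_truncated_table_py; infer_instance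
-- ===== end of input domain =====

-- B replaces A's reversed scan-with-break plus a second any-pass by one forward pass over the
-- lines that keeps a running block counter and separator flag (objective: simpler, same cost).

-- ===== PORT A =====
-- A's reversed-loop with break, building table_lines by insert(0, stripped)
def pvTblLoop : List String → List String → List String
  | [], acc => acc
  | l :: rest, acc =>
    let stripped := PySem.Str.strip l
    if PySem.Str.startswith stripped "|" && PySem.Str.endswith stripped "|" then
      pvTblLoop rest (stripped :: acc)
    else acc

def is_truncated_table_py (text : String) : Bool :=
  if text == "" then false
  else
    let lines := (PySem.Str.splitlines text).filter (fun l => !(PySem.Str.strip l == ""))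
    if lines.length < 2 then false
    else
      let last := PySem.Str.strip ((PySem.List.pyGet? lines (-1)).getD "")
      if !(PySem.Str.startswith last "|" && PySem.Str.endswith last "|") then false
      else
        let table_lines := pvTblLoop lines.reverse []
        let has_separator := table_lines.any (fun l =>
          PySem.Set.equal
            (PySem.Set.ofList (PySem.Str.replace (PySem.Str.replace (PySem.Str.replace
              (PySem.Str.replace l "|" "") "-" "") ":" "") " " "").toList)
            (PySem.Set.ofList []))
        decide (table_lines.length < 3) || !has_separator

-- ===== PORT B =====
def isRowLine (s : String) : Bool := PySem.Str.startswith s "|" && PySem.Str.endswith s "|"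

def isSepLine (s : String) : Bool :=
  s.toList.all (fun c => c == '|' || c == '-' || c == ':' || c == ' ')

-- state: (block_len, has_sep, n, last_is_row)
def pvAltStep (st : Nat × Bool × Nat × Bool) (raw : String) : Nat × Bool × Nat × Bool :=
  let s := PySem.Str.strip raw
  if s == "" then st
  else if isRowLine s then (st.1 + 1, st.2.1 || isSepLine s, st.2.2.1 + 1, true)
  else (0, false, st.2.2.1 + 1, false)

def is_truncated_table_py_alt (text : String) : Bool :=
  if text == "" then false
  else
    let st := (PySem.Str.splitlines text).foldl pvAltStep (0, false, 0, false)
    if st.2.2.1 < 2 || !st.2.2.2 then false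
    else decide (st.1 < 3) || !st.2.1

-- ===== PRECONDITION & SPEC =====
def Spec_is_truncated_table_py (text : String) (out : Bool) : Prop := out = is_truncated_table_py_alt text
instance (text : String) (out : Bool) : Decidable (Spec_is_truncated_table_py text out) := by unfold Spec_is_truncated_table_py; infer_instance

-- ===== CLAIM (what is proved, stated in full; the proofs are below) =====
def Claim_equal_is_truncated_table_py : Prop := ∀ (text : String), Dom_is_truncated_table_py text → Spec_is_truncated_table_py text (is_truncated_table_py text)

-- ===== LEMMAS AND PROOFS =====

-- replace(s, c, "") removes exactly the occurrences of the single character c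
theorem pv_repl_go (c : Char) : ∀ (fuel : Nat) (l acc : List Char), l.length ≤ fuel →
    PySem.Chars.replace.go [c] [] fuel l acc = acc.reverse ++ l.filter (fun x => !(x == c)) := by
  intro fuel
  induction fuel with
  | zero =>
    intro l acc h
    have : l = [] := List.eq_nil_of_length_eq_zero (Nat.le_zero.mp h)
    subst this
    simp [PySem.Chars.replace.go]
  | succ n ih =>
    intro l acc h
    match l with
    | [] => simp [PySem.Chars.replace.go]
    | x :: t =>
      rw [PySem.Chars.replace.go]
      by_cases hx : x = c
      · subst hx
        rw [if_pos (by simp [List.isPrefixOf])]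
        rw [ih _ _ (by simpa using Nat.le_of_succ_le_succ h)]
        simp
      · rw [if_neg (by simp [List.isPrefixOf]; exact fun hc => absurd hc.symm hx)]
        rw [ih _ _ (by simpa using Nat.le_of_succ_le_succ h)]
        simp [hx]

theorem pv_replace_single (c : Char) (s : List Char) :
    PySem.Chars.replace s [c] [] = s.filter (fun x => !(x == c)) := by
  rw [PySem.Chars.replace]
  rw [if_neg (by simp)]
  rw [pv_repl_go c s.length s [] le_rfl]
  simp

-- set(cs) == set() iff cs is empty
theorem pv_set_empty (cs : List Char) :
    PySem.Set.equal (PySem.Set.ofList cs) (PySem.Set.ofList []) = cs.isEmpty := by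
  have h0 : (PySem.Set.ofList ([] : List Char)) = [] := rfl
  rw [h0]
  cases hcs : cs with
  | nil => simp [PySem.Set.equal, PySem.Set.issubset, PySem.Set.ofList, PySem.Set.empty]
  | cons x t =>
    have hx : x ∈ PySem.Set.ofList (x :: t) := (PySem.Set.mem_ofList _ _).mpr (List.mem_cons_self)
    cases ho : PySem.Set.ofList (x :: t) with
    | nil => rw [ho] at hx; simp at hx
    | cons y u =>
      simp [PySem.Set.equal, PySem.Set.issubset, PySem.Set.contains]

-- A's set-emptiness separator test equals B's all-chars-in-"|-: " test
theorem pv_sep_eq (l : String) :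
    PySem.Set.equal
      (PySem.Set.ofList (PySem.Str.replace (PySem.Str.replace (PySem.Str.replace
        (PySem.Str.replace l "|" "") "-" "") ":" "") " " "").toList)
      (PySem.Set.ofList []) = isSepLine l := by
  rw [pv_set_empty]
  have h : (PySem.Str.replace (PySem.Str.replace (PySem.Str.replace
        (PySem.Str.replace l "|" "") "-" "") ":" "") " " "").toList
      = ((((l.toList.filter (fun x => !(x == '|'))).filter (fun x => !(x == '-'))).filter
          (fun x => !(x == ':'))).filter (fun x => !(x == ' '))) := by
    simp only [PySem.Str.toList_replace]
    rw [show ("|" : String).toList = ['|'] from rfl, show ("-" : String).toList = ['-'] from rfl,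
        show (":" : String).toList = [':'] from rfl, show (" " : String).toList = [' '] from rfl,
        show ("" : String).toList = [] from rfl]
    rw [pv_replace_single, pv_replace_single, pv_replace_single, pv_replace_single]
  rw [h]
  simp only [List.filter_filter]
  rw [Bool.eq_iff_iff, List.isEmpty_iff, List.filter_eq_nil_iff]
  unfold isSepLine
  rw [List.all_eq_true]
  apply forall_congr'
  intro x
  apply imp_congr Iff.rfl
  cases h1 : (x == '|') <;> cases h2 : (x == '-') <;> cases h3 : (x == ':') <;> cases h4 : (x == ' ') <;>
    simp [h1, h2, h3, h4]

-- A's reversed loop computes the (stripped) trailing pipe-row block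
theorem pv_tblLoop_eq : ∀ (xs acc : List String),
    pvTblLoop xs acc = ((xs.map PySem.Str.strip).takeWhile isRowLine).reverse ++ acc := by
  intro xs
  induction xs with
  | nil => intro acc; simp [pvTblLoop]
  | cons l rest ih =>
    intro acc
    rw [pvTblLoop]
    by_cases hr : isRowLine (PySem.Str.strip l) = true
    · rw [if_pos (by simpa [isRowLine] using hr)]
      rw [ih]
      simp [List.takeWhile_cons, hr]
    · rw [if_neg (by simpa [isRowLine] using hr)]
      simp [List.takeWhile_cons, Bool.eq_false_iff.mpr hr]

-- characterisation of B's single forward fold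
theorem pv_fold_eq (xs : List String) :
    xs.foldl pvAltStep (0, false, 0, false) =
      (let ss := (xs.map PySem.Str.strip).filter (fun s => !(s == ""));
       let t := ss.reverse.takeWhile isRowLine;
       (t.length, t.any isSepLine, ss.length, (ss.getLast?.map isRowLine).getD false)) := by
  induction xs using List.reverseRecOn with
  | nil => simp
  | append_singleton xs x ih =>
    rw [List.foldl_append, List.foldl_cons, List.foldl_nil, ih]
    simp only [List.map_append, List.filter_append, List.map_cons, List.map_nil]
    by_cases hb : PySem.Str.strip x = ""
    · simp [pvAltStep, hb]
    · have hb' : (!(PySem.Str.strip x == "")) = true := by simp [hb]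
      simp only [List.filter_cons, hb', if_pos, List.filter_nil]
      by_cases hr : isRowLine (PySem.Str.strip x) = true
      · simp [pvAltStep, hb, hr, List.takeWhile_cons, Bool.or_comm]
      · simp [pvAltStep, hb, Bool.eq_false_iff.mpr hr, List.takeWhile_cons]

-- ===== VERDICT (by name: the statement is the Claim_ definition above) =====
theorem is_truncated_table_py_spec : Claim_equal_is_truncated_table_py := by
  intro text _
  unfold Spec_is_truncated_table_py is_truncated_table_py is_truncated_table_py_alt
  by_cases ht : (text == "") = true
  · simp [ht]
  · rw [if_neg ht, if_neg ht]
    rw [pv_fold_eq]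
    simp only []
    have hss : ((PySem.Str.splitlines text).map PySem.Str.strip).filter (fun s => !(s == ""))
        = ((PySem.Str.splitlines text).filter (fun l => !(PySem.Str.strip l == ""))).map
            PySem.Str.strip := by
      rw [List.filter_map]
      rfl
    rw [hss]
    set lines := (PySem.Str.splitlines text).filter (fun l => !(PySem.Str.strip l == "")) with hlines
    by_cases hlen : lines.length < 2
    · rw [if_pos hlen]
      simp [List.length_map, hlen]
    · have hne : lines ≠ [] := by intro h; rw [h] at hlen; simp at hlen
      have hget : PySem.List.pyGet? lines (-1) = lines.getLast? := by
        have hl : 0 < lines.length := List.length_pos_iff.mpr hne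
        simp [PySem.List.pyGet?, PySem.List.pyIdx?]
        rw [if_pos (by omega : 1 ≤ lines.length)]
        simp [List.getLast?_eq_getElem?]
      rw [if_neg hlen, hget]
      obtain ⟨L, hL⟩ := Option.isSome_iff_exists.mp (List.getLast?_isSome.mpr hne)
      rw [hL]
      have hflag : ((lines.map PySem.Str.strip).getLast?.map isRowLine).getD false
          = isRowLine (PySem.Str.strip L) := by
        rw [List.getLast?_map, hL]
        rfl
      have hrow : ∀ s : String, (PySem.Str.startswith s "|" && PySem.Str.endswith s "|")
          = isRowLine s := fun _ => rfl
      simp only [Option.getD_some, hrow]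
      cases hr : isRowLine (PySem.Str.strip L) with
      | false =>
        rw [if_pos (by simp)]
        have hcond : (decide ((lines.map PySem.Str.strip).length < 2) ||
            !((lines.map PySem.Str.strip).getLast?.map isRowLine).getD false) = true := by
          rw [List.getLast?_map, hL]
          simp [hr]
        rw [if_pos hcond]
      | true =>
        rw [if_neg (by simp)]
        rw [if_neg (by
          simp only [List.length_map]
          simp
          refine ⟨by omega, ?_⟩
          rw [hL]
          simp [hr, Function.comp])]
        rw [pv_tblLoop_eq, List.append_nil, List.map_reverse]
        simp only [pv_sep_eq, List.length_reverse, List.any_reverse]
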